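-- pv_equiv track=rewrite | github.com/taboularasa/ironclaw | crates/ironclaw_engine/orchestrator/default.py | signals_tool_intent
-- ===== SOURCE A (Python) =====
-- def signals_tool_intent(text):
--     """Check if text describes tool usage without actually executing tools."""
--     lower = text.lower()
--     intent_phrases = ["i will", "i'll", "let me", "i would", "i should",
--                       "i can", "i need to", "we should", "we can"]
--     tool_phrases = ["search", "fetch", "call", "run", "execute",
--                     "use the", "query", "look up"]
--     has_intent = any(p in lower for p in intent_phrases)
--     has_tool = any(p in lower for p in tool_phrases)
--     return has_intent and has_tool
-- ===== SOURCE B (Python) =====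
-- INTENT_PHRASES = ("i will", "i'll", "let me", "i would", "i should",
--                   "i can", "i need to", "we should", "we can")
-- TOOL_PHRASES = ("search", "fetch", "call", "run", "execute",
--                 "use the", "query", "look up")
--
--
-- def signals_tool_intent(text):
--     """Check if text describes tool usage without actually executing tools.
--
--     Single left-to-right scan: at each position test whether some phrase of
--     either set starts there, keeping one flag per set, and stop as soon as
--     both flags are set.
--     """
--     lower = text.lower()
--     has_intent = False
--     has_tool = False
--     for i in range(len(lower)):
--         if not has_intent and any(lower.startswith(p, i) for p in INTENT_PHRASES):
--             has_intent = True
--         if not has_tool and any(lower.startswith(p, i) for p in TOOL_PHRASES):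
--             has_tool = True
--         if has_intent and has_tool:
--             return True
--     return False
-- ===== Notes on version B (the rewrite author's own statement) =====
-- stated objective: alternative
-- what changed: Replaces two independent substring-containment passes ('p in lower' per phrase) with a single left-to-right scan over positions that tests phrase prefixes at each position, maintains one flag per phrase set, and exits early once both are found.
import Mathlib
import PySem

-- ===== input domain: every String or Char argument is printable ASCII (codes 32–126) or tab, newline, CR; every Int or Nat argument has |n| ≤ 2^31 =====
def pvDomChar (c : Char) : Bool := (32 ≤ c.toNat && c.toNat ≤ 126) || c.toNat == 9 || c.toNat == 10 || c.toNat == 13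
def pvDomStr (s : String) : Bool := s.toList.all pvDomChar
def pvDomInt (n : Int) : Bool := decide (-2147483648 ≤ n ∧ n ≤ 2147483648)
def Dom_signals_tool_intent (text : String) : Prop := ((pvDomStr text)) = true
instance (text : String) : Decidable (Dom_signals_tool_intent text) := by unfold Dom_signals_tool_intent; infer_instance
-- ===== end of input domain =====

-- B replaces A's two per-phrase containment passes by one left-to-right scan with
-- two flags and early exit (objective: alternative; same worst-case cost).

-- ===== PORT A =====
def signals_tool_intent (text : String) : Bool :=
  let lower := PySem.Str.lower text
  let intent_phrases : List String := ["i will", "i'll", "let me", "i would", "i should",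
                                       "i can", "i need to", "we should", "we can"]
  let tool_phrases : List String := ["search", "fetch", "call", "run", "execute",
                                    "use the", "query", "look up"]
  let has_intent := intent_phrases.any (fun p => PySem.Str.isIn p lower)
  let has_tool := tool_phrases.any (fun p => PySem.Str.isIn p lower)
  has_intent && has_tool

-- ===== PORT B =====
def pvIntentP : List (List Char) :=
  ["i will".toList, "i'll".toList, "let me".toList, "i would".toList, "i should".toList,
   "i can".toList, "i need to".toList, "we should".toList, "we can".toList]
def pvToolP : List (List Char) :=
  ["search".toList, "fetch".toList, "call".toList, "run".toList, "execute".toList,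
   "use the".toList, "query".toList, "look up".toList]

-- loop over the positions i of lower, here as structural recursion on the suffix
-- lower[i:]; Python's lower.startswith(p, i) (0 ≤ i ≤ len) is exactly
-- Chars.startswith (suffix at i) p.
def pvAltLoop : List Char → Bool → Bool → Bool
  | [], _, _ => false
  | c :: rest, has_intent, has_tool =>
    let hi := has_intent || pvIntentP.any (fun p => PySem.Chars.startswith (c :: rest) p)
    let ht := has_tool || pvToolP.any (fun p => PySem.Chars.startswith (c :: rest) p)
    if hi && ht then true else pvAltLoop rest hi ht

def signals_tool_intent_alt (text : String) : Bool :=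
  pvAltLoop (PySem.Str.lower text).toList false false

-- ===== PRECONDITION & SPEC =====
def Spec_signals_tool_intent (text : String) (out : Bool) : Prop := out = signals_tool_intent_alt text
instance (text : String) (out : Bool) : Decidable (Spec_signals_tool_intent text out) := by unfold Spec_signals_tool_intent; infer_instance

-- ===== CLAIM (what is proved, stated in full; the proofs are below) =====
def Claim_equal_signals_tool_intent : Prop := ∀ (text : String), Dom_signals_tool_intent text → Spec_signals_tool_intent text (signals_tool_intent text)

-- ===== LEMMAS AND PROOFS =====

lemma pv_isIn_cons (p : List Char) (c : Char) (rest : List Char) :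
    PySem.Chars.isIn p (c :: rest)
      = (PySem.Chars.startswith (c :: rest) p || PySem.Chars.isIn p rest) := by
  rw [Bool.eq_iff_iff]
  simp only [Bool.or_eq_true, PySem.Chars.isIn_iff_infix, PySem.Chars.startswith_iff,
    List.infix_cons_iff]

lemma pv_any_or (f g : List Char -> Bool) (l : List (List Char)) :
    (l.any fun x => f x || g x) = (l.any f || l.any g) := by
  induction l with
  | nil => rfl
  | cons q qs ih =>
    simp only [List.any_cons, ih]
    cases f q <;> cases g q <;> cases qs.any f <;> cases qs.any g <;> rfl

lemma pv_any_isIn_cons (ph : List (List Char)) (c : Char) (rest : List Char) :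
    ph.any (fun p => PySem.Chars.isIn p (c :: rest))
      = (ph.any (fun p => PySem.Chars.startswith (c :: rest) p)
         || ph.any (fun p => PySem.Chars.isIn p rest)) := by
  simp only [pv_isIn_cons]
  exact pv_any_or _ _ ph

lemma pv_step (f : Bool -> Bool -> Bool) (hi ht si st ai at' : Bool)
    (hrec : ((hi || si) && (ht || st)) = false ->
      f (hi || si) (ht || st) = (((hi || si) || ai) && ((ht || st) || at'))) :
    (if ((hi || si) && (ht || st)) = true then true else f (hi || si) (ht || st))
      = ((hi || (si || ai)) && (ht || (st || at'))) := by
  cases hi <;> cases ht <;> cases si <;> cases st <;> simp_all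

lemma pv_altLoop_eq (cs : List Char) (hi ht : Bool) (h : (hi && ht) = false) :
    pvAltLoop cs hi ht
      = ((hi || pvIntentP.any (fun p => PySem.Chars.isIn p cs))
         && (ht || pvToolP.any (fun p => PySem.Chars.isIn p cs))) := by
  induction cs generalizing hi ht with
  | nil =>
    have e1 : pvIntentP.any (fun p => PySem.Chars.isIn p ([] : List Char)) = false := by decide
    have e2 : pvToolP.any (fun p => PySem.Chars.isIn p ([] : List Char)) = false := by decide
    simp [pvAltLoop, e1, e2, h]
  | cons c rest ih =>
    simp only [pvAltLoop, pv_any_isIn_cons]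
    exact pv_step (pvAltLoop rest) hi ht _ _ _ _ (fun h2 => ih _ _ h2)

-- ===== VERDICT (by name: the statement is the Claim_ definition above) =====
theorem signals_tool_intent_spec : Claim_equal_signals_tool_intent := by
  intro text _
  unfold Spec_signals_tool_intent signals_tool_intent signals_tool_intent_alt
  rw [pv_altLoop_eq _ _ _ rfl]
  simp only [Bool.false_or]
  simp [pvIntentP, pvToolP, PySem.Str.isIn_eq, List.any_cons]
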